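-- pv_equiv track=rewrite | github.com/kmartinez/picogps | main.py | getnextalarm
-- ===== SOURCE A (Python) =====
-- schedule = [0,3,6,9,12,13,15,18,21]
--
-- def getnextalarm(hh):
-- 	nexttime = None
--
-- 	if(hh in schedule):
-- 		position = schedule.index(hh)
-- 		nextpos = position+1
-- 		if(nextpos>(len(schedule)-1)):
-- 			nextpos = 0
-- 		nexttime = schedule[nextpos]
-- 	else:
-- 		for i in schedule:
-- 			if(i>hh):
-- 				nexttime = i
-- 				break
-- 		if(nexttime==None):
-- 			nexttime = 0
-- 	return nexttime
-- ===== SOURCE B (Python) =====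
-- schedule = [0,3,6,9,12,13,15,18,21]
--
-- def getnextalarm(hh):
--     # schedule is sorted ascending, so the next alarm after hh is simply the
--     # first scheduled hour strictly greater than hh, wrapping to 0.
--     return next((i for i in schedule if i > hh), 0)
-- ===== Notes on version B (the rewrite author's own statement) =====
-- stated objective: simpler
-- what changed: Replaced A's membership/index special-case plus fallback scan with one uniform first-match scan (first scheduled hour > hh, default 0), exact because the schedule is sorted ascending.
import Mathlib
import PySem

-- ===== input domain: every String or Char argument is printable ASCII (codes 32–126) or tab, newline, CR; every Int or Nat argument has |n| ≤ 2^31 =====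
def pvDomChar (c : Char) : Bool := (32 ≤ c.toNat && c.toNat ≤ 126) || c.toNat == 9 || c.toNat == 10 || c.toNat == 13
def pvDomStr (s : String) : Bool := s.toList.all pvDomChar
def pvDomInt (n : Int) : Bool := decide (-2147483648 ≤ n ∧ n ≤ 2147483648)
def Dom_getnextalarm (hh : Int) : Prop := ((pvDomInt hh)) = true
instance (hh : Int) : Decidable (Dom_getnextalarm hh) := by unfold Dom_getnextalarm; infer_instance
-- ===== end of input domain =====

-- B replaces A's membership/index special-case plus fallback scan by one uniform
-- first-element-greater-than-hh scan (simpler; exact because the schedule is sorted).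

-- module-level constant 'schedule'
def scheduleL : List Int := [0, 3, 6, 9, 12, 13, 15, 18, 21]

-- ===== PORT A =====
-- literal transliteration of A: membership branch uses list.index and indexing
-- (both always succeed on this concrete schedule, so the Option matches are exact);
-- else branch is the for-loop taking the first i > hh, with 0 if none was set.
def getnextalarm (hh : Int) : Int :=
  if scheduleL.contains hh then
    match PySem.List.index? scheduleL hh with
    | none => 0  -- unreachable: hh ∈ schedule
    | some position =>
      let nextpos := position + 1
      let nextpos := if nextpos > ((scheduleL.length : Int) - 1) then 0 else nextpos
      match PySem.List.pyGet? scheduleL nextpos with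
      | none => 0  -- unreachable: nextpos is in range
      | some v => v
  else
    match scheduleL.find? (fun i => decide (i > hh)) with
    | some i => i
    | none => 0

-- ===== PORT B =====
-- literal transliteration of B: next((i for i in schedule if i > hh), 0)
def getnextalarm_alt (hh : Int) : Int :=
  (scheduleL.find? (fun i => decide (i > hh))).getD 0

-- ===== PRECONDITION & SPEC =====
def Spec_getnextalarm (hh : Int) (out : Int) : Prop := out = getnextalarm_alt hh
instance (hh : Int) (out : Int) : Decidable (Spec_getnextalarm hh out) := by unfold Spec_getnextalarm; infer_instance

-- ===== CLAIM (what is proved, stated in full; the proofs are below) =====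
def Claim_equal_getnextalarm : Prop := ∀ (hh : Int), Dom_getnextalarm hh → Spec_getnextalarm hh (getnextalarm hh)

-- ===== LEMMAS AND PROOFS =====

-- on the member branch, A's "next element (wrapping)" equals B's "first element > hh"
theorem member_case (hh : Int) (h : scheduleL.contains hh = true) :
    getnextalarm hh = getnextalarm_alt hh := by
  have : hh = 0 ∨ hh = 3 ∨ hh = 6 ∨ hh = 9 ∨ hh = 12 ∨ hh = 13 ∨ hh = 15 ∨ hh = 18 ∨ hh = 21 := by
    simpa [scheduleL] using h
  rcases this with h' | h' | h' | h' | h' | h' | h' | h' | h' <;> subst h' <;> decide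

theorem getnextalarm_spec' (hh : Int) : getnextalarm hh = getnextalarm_alt hh := by
  by_cases h : scheduleL.contains hh = true
  · exact member_case hh h
  · simp only [getnextalarm, getnextalarm_alt, if_neg h, Option.getD]
    cases scheduleL.find? (fun i => decide (i > hh)) <;> rfl

-- ===== VERDICT (by name: the statement is the Claim_ definition above) =====
theorem getnextalarm_spec : Claim_equal_getnextalarm := by
  intro hh _
  unfold Spec_getnextalarm
  exact getnextalarm_spec' hh
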